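-- pv_equiv track=rewrite | github.com/manyiu/leetcode_python | 1899_merge-triplets-to-form-target-triplet.py | mergeTriplets
-- ===== SOURCE A (Python) =====
-- from typing import List
--
-- def mergeTriplets(triplets: List[List[int]], target: List[int]) -> bool:
--     good = set()
--
--     for triplet in triplets:
--         invalid = False
--         matched = []
--
--         for i in range(len(target)):
--             if triplet[i] > target[i]:
--                 invalid = True
--                 break
--             if triplet[i] == target[i]:
--                 matched.append(i)
--
--         if not invalid:
--             for i in matched:
--                 good.add(i)
--
--     return len(good) == len(target)
-- ===== SOURCE B (Python) =====
-- from typing import List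
--
-- def mergeTriplets(triplets: List[List[int]], target: List[int]) -> bool:
--     n = len(target)
--     return all(
--         any(all(t[j] <= target[j] for j in range(n)) and t[i] == target[i]
--             for t in triplets)
--         for i in range(n)
--     )
-- ===== Notes on version B (the rewrite author's own statement) =====
-- stated objective: alternative
-- what changed: A makes one pass over the triplets accumulating the set of matched indices and compares its size with len(target); B keeps no state at all: for each target coordinate independently it searches the triplet list for a valid triplet attaining that coordinate, returning the conjunction of these per-coordinate searches.
import Mathlib
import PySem

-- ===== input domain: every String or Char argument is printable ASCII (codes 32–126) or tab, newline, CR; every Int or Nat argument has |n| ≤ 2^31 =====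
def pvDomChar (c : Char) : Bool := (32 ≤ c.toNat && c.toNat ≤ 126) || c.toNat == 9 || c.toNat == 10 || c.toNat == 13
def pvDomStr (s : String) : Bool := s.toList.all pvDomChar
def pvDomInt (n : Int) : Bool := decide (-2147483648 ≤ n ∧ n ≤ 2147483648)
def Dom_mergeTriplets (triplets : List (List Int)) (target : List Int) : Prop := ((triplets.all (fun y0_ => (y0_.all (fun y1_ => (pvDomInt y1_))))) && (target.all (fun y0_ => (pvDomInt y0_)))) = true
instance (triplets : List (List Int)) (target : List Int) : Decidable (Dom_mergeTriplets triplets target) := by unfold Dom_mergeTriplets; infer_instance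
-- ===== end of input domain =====

-- B drops A's accumulated set of matched indices: it searches the triplet list once per target
-- coordinate for a valid triplet attaining it (objective: alternative, stateless staged passes).

-- ===== PORT A =====
-- inner 'for i in range(len(target))' loop: returns (invalid, matched); a failed index read is Python's IndexError (excluded by Pre_)
def pvInnerA (t target : List Int) : List Nat → Bool × List Nat
  | [] => (false, [])
  | i :: rest =>
    match PySem.List.pyGet? t (i : Int), PySem.List.pyGet? target (i : Int) with
    | some a, some b =>
      if a > b then (true, [])
      else if a = b then
        let r := pvInnerA t target rest
        (r.1, i :: r.2)
      else pvInnerA t target rest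
    | _, _ => (true, [])   -- IndexError path, outside Pre_

-- outer 'for triplet in triplets' loop accumulating the set 'good'
def pvOuterA (target : List Int) : List (List Int) → PySem.Set Nat → PySem.Set Nat
  | [], g => g
  | t :: ts, g =>
    let r := pvInnerA t target (List.range target.length)
    pvOuterA target ts (if r.1 then g else r.2.foldl PySem.Set.add g)

def mergeTriplets (triplets : List (List Int)) (target : List Int) : Bool :=
  decide ((pvOuterA target triplets PySem.Set.empty).length = target.length)

-- ===== PORT B =====
-- 'all(t[j] <= target[j] for j in range(n))'; a failed read is Python's IndexError (outside Pre_)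
def pvAllLe (t target : List Int) : List Nat → Bool
  | [] => true
  | j :: rest =>
    match PySem.List.pyGet? t (j : Int), PySem.List.pyGet? target (j : Int) with
    | some a, some b => if a ≤ b then pvAllLe t target rest else false
    | _, _ => false

-- 'all(any(... for t in triplets) for i in range(n))': one search per target coordinate, no state
def mergeTriplets_alt (triplets : List (List Int)) (target : List Int) : Bool :=
  let n := target.length
  (List.range n).all (fun i =>
    triplets.any (fun t =>
      pvAllLe t target (List.range n) &&
      (PySem.List.pyGet? t (i : Int) == PySem.List.pyGet? target (i : Int))))

-- ===== PRECONDITION & SPEC =====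
-- Pre_ excludes exactly the inputs where A raises IndexError: a triplet shorter than target whose
-- entries are all ≤ the corresponding target entries (the inner loop then reads past its end).
def Pre_mergeTriplets (triplets : List (List Int)) (target : List Int) : Prop :=
  ∀ t ∈ triplets, target.length ≤ t.length ∨ ∃ i < t.length, target[i]! < t[i]!
instance (triplets : List (List Int)) (target : List Int) : Decidable (Pre_mergeTriplets triplets target) := by unfold Pre_mergeTriplets; infer_instance

def pvWitness_mergeTriplets : List (List Int) × List Int := ([[2, 5, 3], [1, 8, 4], [1, 7, 5]], [2, 7, 5])

def Spec_mergeTriplets (triplets : List (List Int)) (target : List Int) (out : Bool) : Prop := out = mergeTriplets_alt triplets target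
instance (triplets : List (List Int)) (target : List Int) (out : Bool) : Decidable (Spec_mergeTriplets triplets target out) := by unfold Spec_mergeTriplets; infer_instance

-- ===== CLAIM (what is proved, stated in full; the proofs are below) =====
def Claim_equal_mergeTriplets : Prop := ∀ (triplets : List (List Int)) (target : List Int), Dom_mergeTriplets triplets target → Pre_mergeTriplets triplets target → Spec_mergeTriplets triplets target (mergeTriplets triplets target)

-- ===== LEMMAS AND PROOFS =====

-- the matched indices of a valid triplet
def pvMatched (t target : List Int) : List Nat :=
  (List.range target.length).filter
    (fun i => PySem.List.pyGet? t (i : Int) == PySem.List.pyGet? target (i : Int))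

theorem pvInnerA_fst (t target : List Int) (l : List Nat) :
    (pvInnerA t target l).1 = !(pvAllLe t target l) := by
  induction l with
  | nil => rfl
  | cons i rest ih =>
    simp only [pvInnerA, pvAllLe]
    rcases PySem.List.pyGet? t (↑i : Int) with _ | a <;>
      rcases PySem.List.pyGet? target (↑i : Int) with _ | b <;> simp
    by_cases hab : a > b
    · simp [hab, not_le.mpr hab]
    · have hle : a ≤ b := not_lt.mp hab
      by_cases heq : a = b <;> simp [hab, hle, heq, ih]

theorem pvInnerA_snd (t target : List Int) (l : List Nat)
    (h : pvAllLe t target l = true) :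
    (pvInnerA t target l).2 =
      l.filter (fun (i : Nat) => PySem.List.pyGet? t (↑i : Int) == PySem.List.pyGet? target (↑i : Int)) := by
  induction l with
  | nil => rfl
  | cons i rest ih =>
    simp only [pvInnerA, pvAllLe] at *
    rcases hx : PySem.List.pyGet? t (↑i : Int) with _ | a <;>
      rcases hy : PySem.List.pyGet? target (↑i : Int) with _ | b <;> simp [hx, hy] at h ⊢
    obtain ⟨hle, hrest⟩ := h
    have hab : ¬ a > b := not_lt.mpr hle
    rw [PySem.List.pyGet?_natCast] at hx hy
    by_cases heq : a = b <;>
      simp [hab, heq, ih hrest, hx, hy]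

theorem pvAllLe_spec (t target : List Int) (l : List Nat)
    (h : pvAllLe t target l = true) :
    ∀ i ∈ l, i < t.length ∧ i < target.length ∧ t[i]! ≤ target[i]! := by
  induction l with
  | nil => simp
  | cons j rest ih =>
    simp only [pvAllLe] at h
    rcases hx : PySem.List.pyGet? t (↑j : Int) with _ | a <;>
      rcases hy : PySem.List.pyGet? target (↑j : Int) with _ | b <;> simp [hx, hy] at h
    obtain ⟨hle, hrest⟩ := h
    intro i hi
    rcases List.mem_cons.mp hi with rfl | hi
    · rw [PySem.List.pyGet?_natCast] at hx hy
      have h1 : i < t.length := by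
        by_contra hc
        simp [List.getElem?_eq_none (le_of_not_gt hc)] at hx
      have h2 : i < target.length := by
        by_contra hc
        simp [List.getElem?_eq_none (le_of_not_gt hc)] at hy
      refine ⟨h1, h2, ?_⟩
      rw [List.getElem?_eq_getElem h1] at hx
      rw [List.getElem?_eq_getElem h2] at hy
      simp [h1, h2]
      cases hx; cases hy; exact hle
    · exact ih hrest i hi

-- for a valid triplet and an in-range index, the beq of the two reads is the getElem! equality
theorem pvEqGet (t target : List Int) (i : Nat)
    (hv : pvAllLe t target (List.range target.length) = true) (hi : i < target.length) :
    (PySem.List.pyGet? t (i : Int) == PySem.List.pyGet? target (i : Int)) = true ↔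
      t[i]! = target[i]! := by
  obtain ⟨h1, h2, _⟩ := pvAllLe_spec t target _ hv i (List.mem_range.mpr hi)
  rw [PySem.List.pyGet?_natCast, PySem.List.pyGet?_natCast,
    List.getElem?_eq_getElem h1, List.getElem?_eq_getElem h2]
  simp only [beq_iff_eq, Option.some.injEq]
  simp [h1, h2]

theorem nodup_foldl_add (l : List Nat) (s : PySem.Set Nat) (hs : s.Nodup) :
    (l.foldl PySem.Set.add s).Nodup := by
  induction l generalizing s with
  | nil => exact hs
  | cons x xs ih => exact ih _ (PySem.Set.nodup_add _ _ hs)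

theorem mem_foldl_add' (l : List Nat) (s : PySem.Set Nat) (y : Nat) :
    y ∈ l.foldl PySem.Set.add s ↔ y ∈ s ∨ y ∈ l := by
  induction l generalizing s with
  | nil => simp
  | cons x xs ih =>
    simp only [List.foldl_cons, ih, PySem.Set.mem_add, List.mem_cons]
    tauto

theorem mem_pvOuterA (target : List Int) (ts : List (List Int)) (g : PySem.Set Nat) (x : Nat) :
    x ∈ pvOuterA target ts g ↔
      x ∈ g ∨ ∃ t ∈ ts, pvAllLe t target (List.range target.length) = true ∧ x ∈ pvMatched t target := by
  induction ts generalizing g with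
  | nil => simp [pvOuterA]
  | cons t ts ih =>
    by_cases hv : pvAllLe t target (List.range target.length) = true
    · rw [show pvOuterA target (t :: ts) g
            = pvOuterA target ts ((pvMatched t target).foldl PySem.Set.add g) from by
          simp only [pvOuterA, pvInnerA_fst, hv, Bool.not_true, Bool.false_eq_true, if_false,
            pvInnerA_snd t target _ hv, pvMatched]]
      rw [ih, mem_foldl_add']
      constructor
      · rintro ((h | h) | ⟨u, hu, h1, h2⟩)
        · exact Or.inl h
        · exact Or.inr ⟨t, by simp, hv, h⟩
        · exact Or.inr ⟨u, List.mem_cons_of_mem _ hu, h1, h2⟩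
      · rintro (h | ⟨u, hu, h1, h2⟩)
        · exact Or.inl (Or.inl h)
        · rcases List.mem_cons.mp hu with rfl | hu
          · exact Or.inl (Or.inr h2)
          · exact Or.inr ⟨u, hu, h1, h2⟩
    · have hv' : pvAllLe t target (List.range target.length) = false := by simpa using hv
      rw [show pvOuterA target (t :: ts) g = pvOuterA target ts g from by
          simp only [pvOuterA, pvInnerA_fst, hv', Bool.not_false, if_true]]
      rw [ih]
      constructor
      · rintro (h | ⟨u, hu, h1, h2⟩)
        · exact Or.inl h
        · exact Or.inr ⟨u, List.mem_cons_of_mem _ hu, h1, h2⟩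
      · rintro (h | ⟨u, hu, h1, h2⟩)
        · exact Or.inl h
        · rcases List.mem_cons.mp hu with rfl | hu
          · rw [hv'] at h1; exact absurd h1 (by simp)
          · exact Or.inr ⟨u, hu, h1, h2⟩

theorem nodup_pvOuterA (target : List Int) (ts : List (List Int)) (g : PySem.Set Nat) (hg : g.Nodup) :
    (pvOuterA target ts g).Nodup := by
  induction ts generalizing g with
  | nil => exact hg
  | cons t ts ih =>
    simp only [pvOuterA]
    split
    · exact ih _ hg
    · exact ih _ (nodup_foldl_add _ _ hg)

theorem pvMatched_mem (t target : List Int) (i : Nat)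
    (hv : pvAllLe t target (List.range target.length) = true) :
    i ∈ pvMatched t target ↔ i < target.length ∧ t[i]! = target[i]! := by
  rw [pvMatched, List.mem_filter, List.mem_range]
  constructor
  · rintro ⟨hi, hp⟩
    exact ⟨hi, (pvEqGet t target i hv hi).mp hp⟩
  · rintro ⟨hi, heq⟩
    exact ⟨hi, (pvEqGet t target i hv hi).mpr heq⟩

-- A's result: the set 'good' has n elements iff every index is matched by some valid triplet
theorem pvA_char (target : List Int) (ts : List (List Int)) :
    ((pvOuterA target ts PySem.Set.empty).length = target.length) ↔
      ∀ i < target.length, ∃ t ∈ ts,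
        pvAllLe t target (List.range target.length) = true ∧ t[i]! = target[i]! := by
  set good := pvOuterA target ts PySem.Set.empty with hg
  have hnd : good.Nodup := nodup_pvOuterA target ts _ List.nodup_nil
  have hmem : ∀ x : Nat, x ∈ good ↔ ∃ t ∈ ts,
      pvAllLe t target (List.range target.length) = true ∧ x ∈ pvMatched t target := by
    intro x
    rw [hg, mem_pvOuterA]
    simp [PySem.Set.empty]
  have hsub : good ⊆ List.range target.length := by
    intro x hx
    obtain ⟨t, _, hv, hm⟩ := (hmem x).mp hx
    exact List.mem_range.mpr ((pvMatched_mem t target x hv).mp hm).1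
  have hsp : List.Subperm good (List.range target.length) := hnd.subperm hsub
  constructor
  · intro hlen i hi
    have hperm : List.Perm good (List.range target.length) :=
      hsp.perm_of_length_le (by simp [hlen])
    have : i ∈ good := hperm.mem_iff.mpr (List.mem_range.mpr hi)
    obtain ⟨t, ht, hv, hm⟩ := (hmem i).mp this
    exact ⟨t, ht, hv, ((pvMatched_mem t target i hv).mp hm).2⟩
  · intro h
    have hsub2 : List.range target.length ⊆ good := by
      intro x hx
      obtain ⟨t, ht, hv, heq⟩ := h x (List.mem_range.mp hx)
      exact (hmem x).mpr ⟨t, ht, hv, (pvMatched_mem t target x hv).mpr ⟨List.mem_range.mp hx, heq⟩⟩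
    have h1 : good.length ≤ target.length := by simpa using hsp.length_le
    have h2 : target.length ≤ good.length := by
      simpa using ((List.nodup_range).subperm hsub2).length_le
    omega

-- ===== VERDICT (by name: the statement is the Claim_ definition above) =====
theorem mergeTriplets_spec : Claim_equal_mergeTriplets := by
  intro triplets target _ _
  unfold Spec_mergeTriplets mergeTriplets mergeTriplets_alt
  rw [Bool.eq_iff_iff]
  simp only [decide_eq_true_eq, List.all_eq_true, List.any_eq_true, List.mem_range,
    Bool.and_eq_true]
  rw [pvA_char]
  constructor
  · intro h i hi
    obtain ⟨t, ht, hv, heq⟩ := h i hi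
    exact ⟨t, ht, hv, (pvEqGet t target i hv hi).mpr heq⟩
  · intro h i hi
    obtain ⟨t, ht, hv, hb⟩ := h i hi
    exact ⟨t, ht, hv, (pvEqGet t target i hv hi).mp hb⟩
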